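-- pv_equiv track=rewrite | github.com/milamberr/HackBulgariaPython101 | week2/third.py | numbers_to_message
-- ===== SOURCE A (Python) =====
-- def group(lst):
--     current_group = [lst[0]]
--     result = []
--     for item in lst[1:]:
--         if item == current_group[0]:
--             current_group.append(item)
--         else:
--             result.append(current_group)
--             current_group = [item]
--     result.append(current_group)
--
--     return result
--
-- def numbers_to_message(pressed_sequence):
--     letters1 = 'abcdefghijklmno'
--     letters2 = 'pqrs'
--     letters3 = 'tuv'
--     letters4 = 'wxyz'
--     message = ''
--     cap = False
--     groups = group(pressed_sequence)
--     for x in groups: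
--         letter = ''
--         if x[0] == 0:
--             message += ' '
--         elif x[0] == 1:
--             cap = True
--         else:
--             if x[0] != -1 and x[0] < 7:
--                 letter_inx = (x[0] - 2) * 3 + (len(x) - 1) % 3
--                 letter = letters1[letter_inx]
--             elif x[0] == 7:
--                 letter = letters2[(len(x) - 1) % 4]
--             elif x[0] == 8:
--                 letter = letters3[(len(x) - 1) % 3]
--             elif x[0] == 9:
--                 letter = letters4[(len(x) - 1) % 3]
--             if cap:
--                 letter = letter.upper()
--             message += letter
--             cap = False
--     return message
-- ===== SOURCE B (Python) =====
-- KEYPAD = {2: 'abc', 3: 'def', 4: 'ghi', 5: 'jkl', 6: 'mno', 7: 'pqrs', 8: 'tuv', 9: 'wxyz'}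
--
-- def numbers_to_message(pressed_sequence):
--     message = ''
--     cap = False
--     digit = pressed_sequence[0]
--     count = 1
--     for d in pressed_sequence[1:]:
--         if d == digit:
--             count += 1
--         else:
--             message, cap = _flush(message, cap, digit, count)
--             digit, count = d, 1
--     message, cap = _flush(message, cap, digit, count)
--     return message
--
-- def _flush(message, cap, digit, count):
--     if digit == 0:
--         return message + ' ', cap
--     if digit == 1:
--         return message, True
--     letters = KEYPAD.get(digit, '')
--     ch = letters[(count - 1) % len(letters)] if letters else ''
--     if cap:
--         ch = ch.upper()
--     return message + ch, False
-- ===== Notes on version B (the rewrite author's own statement) =====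
-- stated objective: simpler
-- what changed: B replaces A's two-phase design (build an explicit list-of-lists of equal runs with group(), then loop over the groups with a long if/elif letter-index chain over four string constants) by a single left-to-right pass that tracks the current digit and run length and flushes each completed run through one dict keypad table with a uniform (count-1) % len(letters) index.
-- intended difference: On inputs containing a digit -2 or -3 (A's letter index goes negative and Python's negative-index wraparound yields an accidental letter from 'abcdefghijklmno'; B appends no letter for an unknown digit) or a maximal run of 9s of length c with (c-1)%12 >= 3 (A indexes 'wxyz' with (c-1)%3 — a slip that makes 'z' unreachable — while B uses the intended (c-1)%4), B returns the intended decoding. — e.g. on numbers_to_message([9, 9, 9, 9]): A returns "w", B returns "z"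
import Mathlib
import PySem

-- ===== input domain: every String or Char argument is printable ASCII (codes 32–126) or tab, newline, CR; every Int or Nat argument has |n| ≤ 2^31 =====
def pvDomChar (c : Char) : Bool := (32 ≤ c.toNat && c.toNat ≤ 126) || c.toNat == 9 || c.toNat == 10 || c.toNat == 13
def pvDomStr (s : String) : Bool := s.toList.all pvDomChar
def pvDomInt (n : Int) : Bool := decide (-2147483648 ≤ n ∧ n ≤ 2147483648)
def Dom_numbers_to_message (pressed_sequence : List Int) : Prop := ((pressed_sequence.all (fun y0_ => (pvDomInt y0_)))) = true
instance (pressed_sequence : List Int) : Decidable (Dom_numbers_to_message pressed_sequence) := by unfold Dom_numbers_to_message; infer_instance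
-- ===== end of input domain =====

-- B decodes the T9 presses in ONE pass over run lengths with a dict keypad table instead of
-- A's explicit group() list-of-lists plus an if/elif letter-index chain (objective: simpler);
-- B intentionally differs where A's letter index wraps around (digits -2/-3) or A's '%3' slip
-- on the four-letter key 9 picks the wrong letter (see D_ below).


-- ===== PORT A =====
-- group(): current_group/result loop; current_group[0] read with pyGet? (it is never empty)
def pyGroupStep (st : List Int × List (List Int)) (item : Int) : List Int × List (List Int) :=
  if item = (PySem.List.pyGet? st.1 0).getD 0 then (st.1 ++ [item], st.2)
  else ([item], st.2 ++ [st.1])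

-- lst[0] : none = IndexError on the empty list, excluded by Pre_
def pyGroup (lst : List Int) : List (List Int) :=
  let st := (PySem.List.slice lst (some 1) none).foldl pyGroupStep
      ([(PySem.List.pyGet? lst 0).getD 0], [])
  st.2 ++ [st.1]

-- body of A's 'for x in groups' loop; message carried as List Char (PySem string domain)
def aBody (st : List Char × Bool) (x : List Int) : List Char × Bool :=
  let h := (PySem.List.pyGet? x 0).getD 0
  if h = 0 then (st.1 ++ [' '], st.2)
  else if h = 1 then (st.1, true)
  else
    let letter : List Char :=
      if h ≠ -1 ∧ h < 7 then
        -- letters1[letter_inx] : none = IndexError (reached only for digits ≤ -4, excluded by Pre_)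
        match PySem.Chars.pyGet? ['a','b','c','d','e','f','g','h','i','j','k','l','m','n','o']
            ((h - 2) * 3 + PySem.Int.mod ((x.length : Int) - 1) 3) with
        | some c => [c] | none => []
      else if h = 7 then
        match PySem.Chars.pyGet? ['p','q','r','s'] (PySem.Int.mod ((x.length : Int) - 1) 4) with
        | some c => [c] | none => []
      else if h = 8 then
        match PySem.Chars.pyGet? ['t','u','v'] (PySem.Int.mod ((x.length : Int) - 1) 3) with
        | some c => [c] | none => []
      else if h = 9 then
        match PySem.Chars.pyGet? ['w','x','y','z'] (PySem.Int.mod ((x.length : Int) - 1) 3) with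
        | some c => [c] | none => []
      else []
    let letter := if st.2 then PySem.Chars.upper letter else letter
    (st.1 ++ letter, false)

def numbers_to_message (pressed_sequence : List Int) : String :=
  String.ofList ((pyGroup pressed_sequence).foldl aBody ([], false)).1

-- ===== PORT B =====
def bKeypad : PySem.Dict Int (List Char) :=
  PySem.Dict.mk
    [(2, ['a','b','c']), (3, ['d','e','f']), (4, ['g','h','i']), (5, ['j','k','l']),
     (6, ['m','n','o']), (7, ['p','q','r','s']), (8, ['t','u','v']), (9, ['w','x','y','z'])]

-- _flush(message, cap, digit, count)
def bFlush (message : List Char) (cap : Bool) (digit : Int) (count : Int) : List Char × Bool :=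
  if digit = 0 then (message ++ [' '], cap)
  else if digit = 1 then (message, true)
  else
    let letters := (PySem.Dict.get? bKeypad digit).getD []
    let ch : List Char :=
      if letters ≠ [] then
        -- letters[(count-1) % len(letters)] is always in range (count ≥ 1, len > 0)
        match PySem.Chars.pyGet? letters (PySem.Int.mod (count - 1) (letters.length : Int)) with
        | some c => [c] | none => []
      else []
    let ch := if cap then PySem.Chars.upper ch else ch
    (message ++ ch, false)

-- the 'for d in pressed_sequence[1:]' loop plus the final flush
def bLoop (rest : List Int) (digit : Int) (count : Int) (message : List Char) (cap : Bool) :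
    List Char × Bool :=
  match rest with
  | [] => bFlush message cap digit count
  | d :: rs =>
      if d = digit then bLoop rs digit (count + 1) message cap
      else
        let st := bFlush message cap digit count
        bLoop rs d 1 st.1 st.2

-- pressed_sequence[0] : none = IndexError on the empty list, excluded by Pre_
def numbers_to_message_alt (pressed_sequence : List Int) : String :=
  String.ofList
    (bLoop (PySem.List.slice pressed_sequence (some 1) none)
      ((PySem.List.pyGet? pressed_sequence 0).getD 0) 1 [] false).1

-- ===== PRECONDITION & SPEC =====
-- Pre_ excludes exactly the inputs where the Python A raises IndexError: the empty list
-- (lst[0]) and any list containing a digit ≤ -4 (letter index outside letters1).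
def Pre_numbers_to_message (pressed_sequence : List Int) : Prop :=
  pressed_sequence ≠ [] ∧ ∀ d ∈ pressed_sequence, -3 ≤ d
instance (pressed_sequence : List Int) : Decidable (Pre_numbers_to_message pressed_sequence) := by
  unfold Pre_numbers_to_message; infer_instance

def pvWitness_numbers_to_message : List Int := [4, 4, 3, 1, 2, 0, 9, 9]

-- maximal equal runs of the input as (digit, run length) pairs — input inspection only
def pvRunsAux (d : Int) (c : Int) : List Int → List (Int × Int)
  | [] => [(d, c)]
  | x :: r => if x = d then pvRunsAux d (c + 1) r else (d, c) :: pvRunsAux x 1 r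
def pvRuns : List Int → List (Int × Int)
  | [] => []
  | d :: r => pvRunsAux d 1 r

-- On inputs containing a digit -2 or -3 (A's letter index goes negative and Python's
-- negative-index wraparound yields an accidental letter; B appends no letter for an unknown
-- digit) or a maximal run of 9s of length c with (c-1)%12 ≥ 3 (A indexes 'wxyz' with
-- (c-1)%3, a slip making 'z' unreachable; B uses the intended (c-1)%4), B returns the
-- intended decoding.
def D_numbers_to_message (pressed_sequence : List Int) : Prop :=
  (-2 : Int) ∈ pressed_sequence ∨ (-3 : Int) ∈ pressed_sequence ∨
    ∃ p ∈ pvRuns pressed_sequence, p.1 = 9 ∧ 3 ≤ PySem.Int.mod (p.2 - 1) 12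
instance (pressed_sequence : List Int) : Decidable (D_numbers_to_message pressed_sequence) := by
  unfold D_numbers_to_message; infer_instance

def Spec_numbers_to_message (pressed_sequence : List Int) (out : String) : Prop :=
  ¬ D_numbers_to_message pressed_sequence → out = numbers_to_message_alt pressed_sequence
instance (pressed_sequence : List Int) (out : String) :
    Decidable (Spec_numbers_to_message pressed_sequence out) := by
  unfold Spec_numbers_to_message; infer_instance

def pvDiffWitness_numbers_to_message : List Int := [9, 9, 9, 9]
def pvDiffWitnessOut_numbers_to_message : String × String := ("w", "z")

-- ===== CLAIM (what is proved, stated in full; the proofs are below) =====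
def Claim_unchanged_numbers_to_message : Prop := ∀ (pressed_sequence : List Int), Dom_numbers_to_message pressed_sequence → Pre_numbers_to_message pressed_sequence → Spec_numbers_to_message pressed_sequence (numbers_to_message pressed_sequence)
def Claim_changed_numbers_to_message : Prop := Dom_numbers_to_message (pvDiffWitness_numbers_to_message) ∧ Pre_numbers_to_message (pvDiffWitness_numbers_to_message) ∧ D_numbers_to_message (pvDiffWitness_numbers_to_message) ∧ numbers_to_message (pvDiffWitness_numbers_to_message) = pvDiffWitnessOut_numbers_to_message.1 ∧ numbers_to_message_alt (pvDiffWitness_numbers_to_message) = pvDiffWitnessOut_numbers_to_message.2 ∧ pvDiffWitnessOut_numbers_to_message.1 ≠ pvDiffWitnessOut_numbers_to_message.2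

-- ===== LEMMAS AND PROOFS =====

-- every run digit occurs in the scanned data (or is the seed digit)
theorem pvRunsAux_fst (rest : List Int) : ∀ (d c : Int) (p : Int × Int),
    p ∈ pvRunsAux d c rest → p.1 = d ∨ p.1 ∈ rest := by
  induction rest with
  | nil => intro d c p hp; simp [pvRunsAux] at hp; simp [hp]
  | cons x r ih =>
      intro d c p hp
      simp only [pvRunsAux] at hp
      by_cases hx : x = d
      · simp [hx] at hp
        rcases ih d (c + 1) p hp with h | h
        · exact Or.inl h
        · exact Or.inr (List.mem_cons_of_mem _ h)
      · simp [hx] at hp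
        rcases hp with h | h
        · exact Or.inl (by simp [h])
        · rcases ih x 1 p h with h' | h'
          · exact Or.inr (by simp [h'])
          · exact Or.inr (List.mem_cons_of_mem _ h')

-- every run length is ≥ 1 (seeds are ≥ 1 and counts only grow or reset to 1)
theorem pvRunsAux_snd (rest : List Int) : ∀ (d c : Int), 1 ≤ c → ∀ (p : Int × Int),
    p ∈ pvRunsAux d c rest → 1 ≤ p.2 := by
  induction rest with
  | nil =>
      intro d c hc p hp
      simp [pvRunsAux] at hp
      subst hp; exact hc
  | cons x r ih =>
      intro d c hc p hp
      simp only [pvRunsAux] at hp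
      by_cases hx : x = d
      · simp [hx] at hp; exact ih d (c + 1) (by omega) p hp
      · simp [hx] at hp
        rcases hp with h | h
        · subst h; exact hc
        · exact ih x 1 le_rfl p h

-- A's group() computes exactly the replicated runs
theorem pyGroup_runsAux (rest : List Int) : ∀ (d c : Int) (acc : List (List Int)), 1 ≤ c →
    (let st := rest.foldl pyGroupStep (List.replicate c.toNat d, acc); st.2 ++ [st.1])
      = acc ++ (pvRunsAux d c rest).map (fun p => List.replicate p.2.toNat p.1) := by
  induction rest with
  | nil => intro d c acc _; simp [pvRunsAux]
  | cons x r ih =>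
      intro d c acc hc
      simp only [List.foldl_cons, pvRunsAux]
      have hrep : List.replicate c.toNat d = d :: List.replicate (c.toNat - 1) d := by
        rw [← List.replicate_succ]; congr 1; omega
      have hhead : (PySem.List.pyGet? (List.replicate c.toNat d) 0).getD 0 = d := by
        rw [hrep]; simp [pysem]
      by_cases hx : x = d
      · simp only [pyGroupStep, hhead, hx]
        have h1 : List.replicate c.toNat d ++ [d] = List.replicate (c + 1).toNat d := by
          rw [show (c + 1).toNat = c.toNat + 1 by omega, List.replicate_succ']
        rw [h1]
        exact ih d (c + 1) acc (by omega)
      · simp only [pyGroupStep, hhead, if_neg hx]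
        have h1 : [x] = List.replicate (1 : Int).toNat x := rfl
        rw [h1, ih x 1 (acc ++ [List.replicate c.toNat d]) le_rfl]
        simp

-- B's loop equals the fold of _flush over the runs
theorem bLoop_runsAux (rest : List Int) : ∀ (d c : Int) (msg : List Char) (cap : Bool),
    bLoop rest d c msg cap
      = (pvRunsAux d c rest).foldl (fun st p => bFlush st.1 st.2 p.1 p.2) (msg, cap) := by
  induction rest with
  | nil => intro d c msg cap; simp [bLoop, pvRunsAux]
  | cons x r ih =>
      intro d c msg cap
      simp only [bLoop, pvRunsAux]
      by_cases hx : x = d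
      · simp only [hx]; exact ih d (c + 1) msg cap
      · simp only [if_neg hx, List.foldl_cons]
        exact ih x 1 _ _

-- per-run agreement of A's loop body and B's _flush under Pre_ minus D_
theorem body_eq (st : List Char × Bool) (d c : Int) (hc : 1 ≤ c) (hd : -3 ≤ d)
    (h2 : d ≠ -2) (h3 : d ≠ -3) (h9 : d = 9 → PySem.Int.mod (c - 1) 12 < 3) :
    aBody st (List.replicate c.toNat d) = bFlush st.1 st.2 d c := by
  obtain ⟨msg, cap⟩ := st
  have hrep : List.replicate c.toNat d = d :: List.replicate (c.toNat - 1) d := by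
    rw [← List.replicate_succ]; congr 1; omega
  have hhead : (PySem.List.pyGet? (List.replicate c.toNat d) 0).getD 0 = d := by
    rw [hrep]; simp [pysem]
  have hlen : ((List.replicate c.toNat d).length : Int) - 1 = c - 1 := by
    rw [List.length_replicate]; omega
  simp only [aBody, bFlush]
  rw [hhead, hlen]
  by_cases h0 : d = 0
  · simp [h0]
  by_cases h1 : d = 1
  · simp [h1]
  simp only [if_neg h0, if_neg h1]
  by_cases hneg : d = -1
  · subst hneg
    simp [bKeypad, PySem.Dict.get?, PySem.Chars.upper]
  by_cases h7 : d = 7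
  · subst h7
    rw [show (PySem.Dict.get? bKeypad 7).getD ([] : List Char) = ['p','q','r','s'] from by decide]
    have a4 : PySem.Int.mod (c - 1) 4 = (c - 1) % 4 :=
      PySem.Int.mod_eq_emod_of_pos (by norm_num)
    have hr : (c - 1) % 4 = 0 ∨ (c - 1) % 4 = 1 ∨ (c - 1) % 4 = 2 ∨ (c - 1) % 4 = 3 := by omega
    rcases hr with h | h | h | h <;>
      norm_num [h, PySem.Chars.pyGet?_eq_listPyGet?, PySem.List.pyGet?, PySem.List.pyIdx?] <;>
      simp
  by_cases h8 : d = 8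
  · subst h8
    rw [show (PySem.Dict.get? bKeypad 8).getD ([] : List Char) = ['t','u','v'] from by decide]
    have a3 : PySem.Int.mod (c - 1) 3 = (c - 1) % 3 :=
      PySem.Int.mod_eq_emod_of_pos (by norm_num)
    have hr : (c - 1) % 3 = 0 ∨ (c - 1) % 3 = 1 ∨ (c - 1) % 3 = 2 := by omega
    rcases hr with h | h | h <;>
      norm_num [h, PySem.Chars.pyGet?_eq_listPyGet?, PySem.List.pyGet?, PySem.List.pyIdx?] <;>
      simp
  by_cases h9' : d = 9
  · have h12 := h9 h9'
    subst h9'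
    rw [show (PySem.Dict.get? bKeypad 9).getD ([] : List Char) = ['w','x','y','z'] from by decide]
    have a12 : PySem.Int.mod (c - 1) 12 = (c - 1) % 12 :=
      PySem.Int.mod_eq_emod_of_pos (by norm_num)
    -- ¬ D_ forbids (c-1) % 12 ≥ 3, so A's % 3 and B's % 4 select the same letter
    have hr : ((c - 1) % 3 = 0 ∧ (c - 1) % 4 = 0) ∨ ((c - 1) % 3 = 1 ∧ (c - 1) % 4 = 1) ∨
        ((c - 1) % 3 = 2 ∧ (c - 1) % 4 = 2) := by omega
    rcases hr with ⟨hra, hrb⟩ | ⟨hra, hrb⟩ | ⟨hra, hrb⟩ <;>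
      norm_num [hra, hrb, PySem.Chars.pyGet?_eq_listPyGet?, PySem.List.pyGet?,
        PySem.List.pyIdx?] <;>
      simp
  by_cases hlo : d < 7
  · -- d ∈ {2,3,4,5,6}
    have hd2 : d = 2 ∨ d = 3 ∨ d = 4 ∨ d = 5 ∨ d = 6 := by omega
    have a3 : PySem.Int.mod (c - 1) 3 = (c - 1) % 3 :=
      PySem.Int.mod_eq_emod_of_pos (by norm_num)
    have hr : (c - 1) % 3 = 0 ∨ (c - 1) % 3 = 1 ∨ (c - 1) % 3 = 2 := by omega
    rcases hd2 with h | h | h | h | h <;> subst h <;>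
      first
        | rw [show (PySem.Dict.get? bKeypad 2).getD ([] : List Char) = ['a','b','c'] from by decide]
        | rw [show (PySem.Dict.get? bKeypad 3).getD ([] : List Char) = ['d','e','f'] from by decide]
        | rw [show (PySem.Dict.get? bKeypad 4).getD ([] : List Char) = ['g','h','i'] from by decide]
        | rw [show (PySem.Dict.get? bKeypad 5).getD ([] : List Char) = ['j','k','l'] from by decide]
        | rw [show (PySem.Dict.get? bKeypad 6).getD ([] : List Char) = ['m','n','o'] from by decide]
    all_goals
      rcases hr with h | h | h <;>
        norm_num [h, PySem.Chars.pyGet?_eq_listPyGet?, PySem.List.pyGet?, PySem.List.pyIdx?] <;>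
        simp
  · -- unknown digit ≥ 10: both the if/elif chain and the dict lookup yield no letter
    have hk : PySem.Dict.get? bKeypad d = none := by
      simp [bKeypad, PySem.Dict.get?, show (2:Int) ≠ d by omega, show (3:Int) ≠ d by omega,
        show (4:Int) ≠ d by omega, show (5:Int) ≠ d by omega, show (6:Int) ≠ d by omega,
        show (7:Int) ≠ d by omega, show (8:Int) ≠ d by omega, show (9:Int) ≠ d by omega]
    have hA7 : ¬(d ≠ -1 ∧ d < 7) := by omega
    simp [hA7, h7, h8, h9', hk, PySem.Chars.upper]

-- ===== VERDICT (by name: the statement is the Claim_ definition above) =====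
theorem numbers_to_message_spec : Claim_unchanged_numbers_to_message := by
  intro l _ hpre
  unfold Spec_numbers_to_message
  intro hnd
  obtain ⟨hne, hge⟩ := hpre
  rcases l with _ | ⟨h, t⟩
  · exact absurd rfl hne
  simp only [D_numbers_to_message, not_or, pvRuns] at hnd
  obtain ⟨hn2, hn3, hn9⟩ := hnd
  push Not at hn9
  -- reduce A to a fold over the runs
  have hA : numbers_to_message (h :: t)
      = String.ofList (((pvRunsAux h 1 t).map (fun p => List.replicate p.2.toNat p.1)).foldl
          aBody ([], false)).1 := by
    unfold numbers_to_message pyGroup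
    have hslice : PySem.List.slice (h :: t) (some 1) none = t := by simp [pysem]
    have hget : (PySem.List.pyGet? (h :: t) 0).getD 0 = h := by simp [pysem]
    rw [hslice, hget]
    have := pyGroup_runsAux t h 1 [] le_rfl
    simp only [List.nil_append] at this
    rw [show [h] = List.replicate (1 : Int).toNat h from rfl, this]
  -- reduce B to a fold over the runs
  have hB : numbers_to_message_alt (h :: t)
      = String.ofList ((pvRunsAux h 1 t).foldl
          (fun st p => bFlush st.1 st.2 p.1 p.2) ([], false)).1 := by
    unfold numbers_to_message_alt
    have hslice : PySem.List.slice (h :: t) (some 1) none = t := by simp [pysem]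
    have hget : (PySem.List.pyGet? (h :: t) 0).getD 0 = h := by simp [pysem]
    rw [hslice, hget, bLoop_runsAux]
  rw [hA, hB, List.foldl_map]
  congr 1
  apply congrArg
  apply PySem.List.foldl_congr_mem
  intro st p hp
  have hd : p.1 = h ∨ p.1 ∈ t := pvRunsAux_fst t h 1 p hp
  have hdl : p.1 ∈ h :: t := by rcases hd with h' | h' <;> simp [h']
  have hge' : -3 ≤ p.1 := hge p.1 hdl
  have hne2 : p.1 ≠ -2 := fun he => hn2 (he ▸ hdl)
  have hne3 : p.1 ≠ -3 := fun he => hn3 (he ▸ hdl)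
  have hc : 1 ≤ p.2 := pvRunsAux_snd t h 1 le_rfl p hp
  exact body_eq st p.1 p.2 hc hge' hne2 hne3 (fun h9 => by
    have := hn9 p hp h9
    have := PySem.Int.mod_lt (p.2 - 1) (by norm_num : (0:Int) < 12)
    omega)

theorem numbers_to_message_changed : Claim_changed_numbers_to_message := by
  unfold Claim_changed_numbers_to_message; decide
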